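-- pv_equiv track=rewrite | github.com/tjhrad/advent_of_code | 2017/3/day3.py | find_starting_index
-- ===== SOURCE A (Python) =====
-- def find_starting_index(s_length, p_from_end):
--   x = 0
--   y = 0
--
--   #If even, set the starting indices to the bottom right corner
--   if not ((s_length * s_length) % 2):
--     for i in range(p_from_end):
--       if (x < s_length - 1):
--         x += 1
--       else:
--         y += 1
--   else:
--     x = s_length - 1
--     y = s_length - 1
--     for i in range(p_from_end):
--       if (x > 0):
--         x -= 1
--       else:
--         y -= 1
--
--   return (x,y)
-- ===== SOURCE B (Python) =====
-- def find_starting_index(s_length, p_from_end):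
--   # Closed form: the walk moves along x first (toward/away from the corner),
--   # then along y; even/odd side length picks the corner and direction.
--   p = max(p_from_end, 0)
--   dx = min(p, max(s_length - 1, 0))
--   dy = p - dx
--   if s_length % 2 == 0:
--     return (dx, dy)
--   else:
--     return (s_length - 1 - dx, s_length - 1 - dy)
-- ===== Notes on version B (the rewrite author's own statement) =====
-- stated objective: faster
-- what changed: Replaced the step-by-step walk of p_from_end iterations with a closed-form min/max computation of how far the walk gets along each axis.
import Mathlib
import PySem

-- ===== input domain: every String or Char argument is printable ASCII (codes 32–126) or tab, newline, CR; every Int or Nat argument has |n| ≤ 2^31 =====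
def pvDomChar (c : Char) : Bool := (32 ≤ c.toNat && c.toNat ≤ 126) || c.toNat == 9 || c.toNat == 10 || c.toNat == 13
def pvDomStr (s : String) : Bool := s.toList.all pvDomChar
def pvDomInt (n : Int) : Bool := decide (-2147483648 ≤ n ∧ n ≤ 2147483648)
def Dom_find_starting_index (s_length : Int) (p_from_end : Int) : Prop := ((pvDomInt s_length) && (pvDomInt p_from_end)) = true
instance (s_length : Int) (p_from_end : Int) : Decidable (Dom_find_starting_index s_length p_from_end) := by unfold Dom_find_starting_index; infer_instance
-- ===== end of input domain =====

-- B replaces A's p_from_end-step walk with a closed-form min/max computation (asymptotically faster).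


-- ===== PORT A =====
-- step of the even-side loop: "if x < s_length - 1: x += 1 else: y += 1"
def pvStepEven (s_length : Int) (st : Int × Int) : Int × Int :=
  if st.1 < s_length - 1 then (st.1 + 1, st.2) else (st.1, st.2 + 1)

-- step of the odd-side loop: "if x > 0: x -= 1 else: y -= 1"
def pvStepOdd (st : Int × Int) : Int × Int :=
  if st.1 > 0 then (st.1 - 1, st.2) else (st.1, st.2 - 1)

def find_starting_index (s_length : Int) (p_from_end : Int) : Int × Int :=
  if (s_length * s_length) % 2 = 0 then
    (List.range p_from_end.toNat).foldl (fun st _ => pvStepEven s_length st) (0, 0)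
  else
    (List.range p_from_end.toNat).foldl (fun st _ => pvStepOdd st) (s_length - 1, s_length - 1)

-- ===== PORT B =====
def find_starting_index_alt (s_length : Int) (p_from_end : Int) : Int × Int :=
  let p := max p_from_end 0
  let dx := min p (max (s_length - 1) 0)
  let dy := p - dx
  if s_length % 2 = 0 then (dx, dy) else (s_length - 1 - dx, s_length - 1 - dy)

-- ===== PRECONDITION & SPEC =====
def Spec_find_starting_index (s_length : Int) (p_from_end : Int) (out : Int × Int) : Prop := out = find_starting_index_alt s_length p_from_end
instance (s_length : Int) (p_from_end : Int) (out : Int × Int) : Decidable (Spec_find_starting_index s_length p_from_end out) := by unfold Spec_find_starting_index; infer_instance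

-- ===== CLAIM (what is proved, stated in full; the proofs are below) =====
def Claim_equal_find_starting_index : Prop := ∀ (s_length : Int) (p_from_end : Int), Dom_find_starting_index s_length p_from_end → Spec_find_starting_index s_length p_from_end (find_starting_index s_length p_from_end)

-- ===== LEMMAS AND PROOFS =====

theorem pvEvenLoop (s : Int) (n : ℕ) :
    (List.range n).foldl (fun st _ => pvStepEven s st) (0, 0) =
      (min (↑n) (max (s - 1) 0), ↑n - min (↑n) (max (s - 1) 0)) := by
  induction n with
  | zero => simp
  | succ n ih =>
    rw [List.range_succ, List.foldl_append, ih]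
    simp only [List.foldl_cons, List.foldl_nil, pvStepEven]
    split_ifs with h
    · refine Prod.ext ?_ ?_ <;> simp <;> omega
    · refine Prod.ext ?_ ?_ <;> simp at h ⊢ <;> omega

theorem pvOddLoop (s : Int) (n : ℕ) :
    (List.range n).foldl (fun st _ => pvStepOdd st) (s - 1, s - 1) =
      (s - 1 - min (↑n) (max (s - 1) 0),
       s - 1 - (↑n - min (↑n) (max (s - 1) 0))) := by
  induction n with
  | zero => simp
  | succ n ih =>
    rw [List.range_succ, List.foldl_append, ih]
    simp only [List.foldl_cons, List.foldl_nil, pvStepOdd]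
    split_ifs with h
    · refine Prod.ext ?_ ?_ <;> simp at h ⊢ <;> omega
    · refine Prod.ext ?_ ?_ <;> simp at h ⊢ <;> omega

theorem pvParity (s : Int) : (s * s) % 2 = 0 ↔ s % 2 = 0 := by
  rw [← Int.even_iff, ← Int.even_iff, Int.even_mul, or_self]

-- ===== VERDICT (by name: the statement is the Claim_ definition above) =====
theorem find_starting_index_spec : Claim_equal_find_starting_index := by
  intro s p _
  unfold Spec_find_starting_index find_starting_index find_starting_index_alt
  have hp : (↑p.toNat : Int) = max p 0 := by omega
  by_cases h : s % 2 = 0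
  · rw [if_pos ((pvParity s).mpr h), if_pos h, pvEvenLoop, hp]
  · rw [if_neg (fun hc => h ((pvParity s).mp hc)), if_neg h, pvOddLoop, hp]
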